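-- pv_equiv track=rewrite | github.com/pypi-data/pypi-mirror-320 | packages/pytigon-lib/pytigon_lib-0.250110-py3-none-any.whl/pytigon_lib/schdjangoext/fastform.py | _scan_lines
-- ===== SOURCE A (Python) =====
-- def _scan_lines(input_str):
--     l = input_str.replace("\r", "").split("\n")
--     ret = []
--     append_to_last = False
--     for pos in l:
--         if append_to_last:
--             ret[-1] = ret[-1] + ";" + pos
--             if "]" in pos:
--                 append_to_last = False
--         else:
--             ret.append(pos)
--             if ":[" in pos and not "]" in pos:
--                 append_to_last = True
--     return ret
-- ===== SOURCE B (Python) =====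
-- def _scan_lines(input_str):
--     l = input_str.replace("\r", "").split("\n")
--     ret = []
--     i = 0
--     n = len(l)
--     while i < n:
--         cur = l[i]
--         i += 1
--         if ":[" in cur and "]" not in cur:
--             while i < n:
--                 cur = cur + ";" + l[i]
--                 done = "]" in l[i]
--                 i += 1
--                 if done:
--                     break
--         ret.append(cur)
--     return ret
-- ===== Notes on version B (the rewrite author's own statement) =====
-- stated objective: alternative
-- what changed: Replaces the boolean-flag loop that mutates ret[-1] with an index/while traversal that consumes each bracketed continuation run in an inner loop and appends one finished merged string per run.
import Mathlib
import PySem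

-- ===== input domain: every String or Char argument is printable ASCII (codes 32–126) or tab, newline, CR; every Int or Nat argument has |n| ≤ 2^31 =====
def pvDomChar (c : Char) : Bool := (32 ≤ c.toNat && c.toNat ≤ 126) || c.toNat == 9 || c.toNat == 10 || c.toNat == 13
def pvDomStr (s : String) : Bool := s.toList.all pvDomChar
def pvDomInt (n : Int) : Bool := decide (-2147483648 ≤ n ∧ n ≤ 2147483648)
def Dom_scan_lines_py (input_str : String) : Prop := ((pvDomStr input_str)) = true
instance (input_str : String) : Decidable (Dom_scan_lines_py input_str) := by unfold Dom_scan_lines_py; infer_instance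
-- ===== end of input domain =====

-- B replaces A's boolean-flag loop mutating ret[-1] with an index/while traversal whose inner
-- loop consumes each bracketed continuation run and appends one finished merged string (alternative decomposition).

-- ===== PORT A =====
-- A's loop body as a fold step over the state (ret, append_to_last).
-- ret[-1] = ret[-1] + ";" + pos is ported as dropLast ++ [getLastD "" …]: when the flag is true,
-- ret is nonempty (the flag is only set right after an append), so the getLastD default is unreachable.
def pvStepA (st : List String × Bool) (pos : String) : List String × Bool :=
  if st.2 then
    (st.1.dropLast ++ [st.1.getLastD "" ++ ";" ++ pos],
     if PySem.Str.isIn "]" pos then false else st.2)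
  else
    (st.1 ++ [pos], PySem.Str.isIn ":[" pos && !(PySem.Str.isIn "]" pos))

-- split("\n") with a nonempty literal separator: Str.split? is some here; getD [] is unreachable.
def pvLines (input_str : String) : List String :=
  (PySem.Str.split? (PySem.Str.replace input_str "\r" "") "\n").getD []

def scan_lines_py (input_str : String) : List String :=
  (List.foldl pvStepA ([], false) (pvLines input_str)).1

-- ===== PORT B =====
-- inner while: merge lines into cur until (and including) the first one containing "]";
-- returns the merged string and the remaining lines.
def pvConsume (cur : String) : List String → String × List String
  | [] => (cur, [])
  | x :: xs =>
    if PySem.Str.isIn "]" x then (cur ++ ";" ++ x, xs)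
    else pvConsume (cur ++ ";" ++ x) xs

-- outer while over the line list
-- the inner loop never lengthens the remainder (used for pvGoB's termination)
theorem pvConsume_len (cur : String) (xs : List String) :
    (pvConsume cur xs).2.length ≤ xs.length := by
  induction xs generalizing cur with
  | nil => simp [pvConsume]
  | cons y ys ih =>
    simp only [pvConsume]
    split
    · simp
    · exact le_trans (ih _) (Nat.le_succ _)

def pvGoB : List String → List String
  | [] => []
  | x :: xs =>
    if PySem.Str.isIn ":[" x && !(PySem.Str.isIn "]" x) then
      (pvConsume x xs).1 :: pvGoB (pvConsume x xs).2
    else x :: pvGoB xs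
termination_by l => l.length
decreasing_by
  · exact Nat.lt_succ_of_le (pvConsume_len x xs)
  · simp

def scan_lines_py_alt (input_str : String) : List String :=
  pvGoB (pvLines input_str)

-- ===== PRECONDITION & SPEC =====
def Spec_scan_lines_py (input_str : String) (out : List String) : Prop := out = scan_lines_py_alt input_str
instance (input_str : String) (out : List String) : Decidable (Spec_scan_lines_py input_str out) := by unfold Spec_scan_lines_py; infer_instance

-- ===== CLAIM (what is proved, stated in full; the proofs are below) =====
def Claim_equal_scan_lines_py : Prop := ∀ (input_str : String), Dom_scan_lines_py input_str → Spec_scan_lines_py input_str (scan_lines_py input_str)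

-- ===== LEMMAS AND PROOFS =====

-- loop invariant: A's fold from (acc, false) appends goB of the rest, and from (acc ++ [cur], true)
-- appends the run-merge of cur with the rest, simultaneously by induction on the line list.
theorem pv_fold_inv (lines : List String) :
    (∀ acc : List String, (List.foldl pvStepA (acc, false) lines).1 = acc ++ pvGoB lines) ∧
    (∀ (acc : List String) (cur : String),
      (List.foldl pvStepA (acc ++ [cur], true) lines).1 =
        acc ++ ((pvConsume cur lines).1 :: pvGoB (pvConsume cur lines).2)) := by
  induction lines with
  | nil => simp [pvGoB, pvConsume]
  | cons x xs ih =>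
    constructor
    · intro acc
      have hstep : pvStepA (acc, false) x
          = (acc ++ [x], PySem.Str.isIn ":[" x && !(PySem.Str.isIn "]" x)) := rfl
      rw [List.foldl_cons, hstep, pvGoB]
      by_cases h : (PySem.Str.isIn ":[" x && !(PySem.Str.isIn "]" x)) = true
      · rw [h, if_pos rfl, ih.2 acc x]
      · rw [eq_false_of_ne_true h, if_neg Bool.false_ne_true, ih.1 (acc ++ [x]),
          List.append_assoc, List.singleton_append]
    · intro acc cur
      have hstep : pvStepA (acc ++ [cur], true) x
          = (acc ++ [cur ++ ";" ++ x], if PySem.Str.isIn "]" x then false else true) := by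
        simp [pvStepA]
      rw [List.foldl_cons, hstep, pvConsume]
      by_cases h : PySem.Str.isIn "]" x = true
      · rw [if_pos h, if_pos h, ih.1 (acc ++ [cur ++ ";" ++ x]),
          List.append_assoc, List.singleton_append]
      · rw [if_neg h, if_neg h, ih.2 acc (cur ++ ";" ++ x)]

-- ===== VERDICT (by name: the statement is the Claim_ definition above) =====
theorem scan_lines_py_spec : Claim_equal_scan_lines_py := by
  intro input_str _
  unfold Spec_scan_lines_py scan_lines_py scan_lines_py_alt
  simpa using (pv_fold_inv (pvLines input_str)).1 []
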